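-- pv_equiv track=rewrite | github.com/tripura-kant/Python-Scripting | scaler/30aug1.py | solve
-- ===== SOURCE A (Python) =====
-- def solve(A):
--     n = len(A)
--
--     if n == 0:
--         return 0
--
--     # Step 1: Find min and max values
--     min_val = min(A)
--     max_val = max(A)
--
--     # Initialize the smallest length as a large number
--     smallest_length = float('inf')
--
--     # Step 2: Brute-force search
--     for start in range(n):
--         for end in range(start, n):
--             subarray = A[start:end + 1]
--             if min_val in subarray and max_val in subarray:
--                 smallest_length = min(smallest_length, end - start + 1)
--
--     return smallest_length
-- ===== SOURCE B (Python) =====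
-- def solve(A):
--     # One pass: for each position, the best window ending here pairs it with the
--     # most recent occurrence of the opposite extreme.
--     n = len(A)
--     if n == 0:
--         return 0
--     lo = min(A)
--     hi = max(A)
--     best = n
--     last_lo = -1
--     last_hi = -1
--     for i, x in enumerate(A):
--         if x == lo:
--             last_lo = i
--             if last_hi >= 0:
--                 best = min(best, i - last_hi + 1)
--         if x == hi:
--             last_hi = i
--             if last_lo >= 0:
--                 best = min(best, i - last_lo + 1)
--     return best
-- ===== Notes on version B (the rewrite author's own statement) =====
-- stated objective: faster
-- what changed: replaced the O(n^3) brute-force over all (start,end) windows with slice membership tests by a single pass that tracks the last index of the min and of the max and shrinks the best window at each element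
import Mathlib
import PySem

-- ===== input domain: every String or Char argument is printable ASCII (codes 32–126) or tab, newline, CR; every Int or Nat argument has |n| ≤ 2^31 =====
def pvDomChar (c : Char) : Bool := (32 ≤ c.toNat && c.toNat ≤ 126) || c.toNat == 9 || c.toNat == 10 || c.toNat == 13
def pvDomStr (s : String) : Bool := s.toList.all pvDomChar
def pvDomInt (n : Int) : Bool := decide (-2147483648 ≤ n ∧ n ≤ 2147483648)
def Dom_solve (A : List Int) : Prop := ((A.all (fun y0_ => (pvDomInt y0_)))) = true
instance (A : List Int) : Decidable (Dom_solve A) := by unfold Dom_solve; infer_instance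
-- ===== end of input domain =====

-- B replaces A's O(n^3) brute force over all windows by a single pass tracking the
-- last index of the min and of the max (objective: faster, asymptotic).


-- ===== PORT A =====
-- smallest_length starts as float('inf'); `none` plays the role of inf and
-- `pmin` is Python's `min` with inf absorbed (min(inf, v) = v).
def pmin (acc : Option Int) (v : Int) : Option Int :=
  some (match acc with | none => v | some m => min m v)

-- body of A's inner loop: test the slice A[start:end+1] and update the running minimum
def ainner (A : List Int) (lo hi start : Int) (acc : Option Int) (e : Int) : Option Int :=
  let sub := PySem.List.slice A (some start) (some (e + 1))
  if lo ∈ sub ∧ hi ∈ sub then pmin acc (e - start + 1) else acc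

def solve (A : List Int) : Int :=
  let n : Int := (A.length : Int)
  if n = 0 then 0
  else
    let lo := ((PySem.List.min? A (fun x => x)).getD 0)
    let hi := ((PySem.List.max? A (fun x => x)).getD 0)
    let best := (PySem.List.pyRange 0 n 1).foldl (fun acc start =>
      (PySem.List.pyRange start n 1).foldl (ainner A lo hi start) acc) none
    -- for n ≠ 0 the whole array qualifies, so best is never none (the inf path is dead)
    best.getD 0

-- ===== PORT B =====
-- body of B's loop: state is (best, last_lo, last_hi), p is (i, x) from enumerate
def bstep (lo hi : Int) (s : Int × Int × Int) (p : Int × Int) : Int × Int × Int :=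
  let i := p.1
  let x := p.2
  let s1 : Int × Int × Int :=
    if x = lo then ((if s.2.2 ≥ 0 then min s.1 (i - s.2.2 + 1) else s.1), i, s.2.2)
    else s
  if x = hi then ((if s1.2.1 ≥ 0 then min s1.1 (i - s1.2.1 + 1) else s1.1), s1.2.1, i)
  else s1

def solve_alt (A : List Int) : Int :=
  let n : Int := (A.length : Int)
  if n = 0 then 0
  else
    let lo := ((PySem.List.min? A (fun x => x)).getD 0)
    let hi := ((PySem.List.max? A (fun x => x)).getD 0)
    let st := (PySem.List.enumerate A 0).foldl (bstep lo hi) (n, -1, -1)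
    st.1

-- ===== PRECONDITION & SPEC =====
def Spec_solve (A : List Int) (out : Int) : Prop := out = solve_alt A
instance (A : List Int) (out : Int) : Decidable (Spec_solve A out) := by unfold Spec_solve; infer_instance

-- ===== CLAIM (what is proved, stated in full; the proofs are below) =====
def Claim_equal_solve : Prop := ∀ (A : List Int), Dom_solve A → Spec_solve A (solve A)

-- ===== LEMMAS AND PROOFS =====

-- v is the length of a window of l containing both lo and hi
def SpanVal (l : List Int) (lo hi v : Int) : Prop :=
  ∃ s e : ℕ, s ≤ e ∧ e < l.length ∧ lo ∈ (l.drop s).take (e + 1 - s) ∧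
    hi ∈ (l.drop s).take (e + 1 - s) ∧ v = (e : Int) - (s : Int) + 1

-- v is |i - j| + 1 for an occurrence i of lo and j of hi
def PairVal (l : List Int) (lo hi v : Int) : Prop :=
  ∃ (i j : ℕ) (_ : i < l.length) (_ : j < l.length),
    l[i] = lo ∧ l[j] = hi ∧ v = ((max i j : ℕ) : Int) - ((min i j : ℕ) : Int) + 1

-- v is the last index of c in l, or -1 when absent
def LastIdx (l : List Int) (c v : Int) : Prop :=
  (v = -1 ∧ c ∉ l) ∨
  (∃ (k : ℕ) (_ : k < l.length), v = (k : Int) ∧ l[k] = c ∧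
    ∀ (j : ℕ) (_ : j < l.length), l[j] = c → j ≤ k)

lemma mem_span_iff (l : List Int) (s e : ℕ) (x : Int) (he : e < l.length) :
    x ∈ (l.drop s).take (e + 1 - s) ↔
      ∃ k : ℕ, s ≤ k ∧ k ≤ e ∧ ∃ _ : k < l.length, l[k] = x := by
  constructor
  · intro h
    obtain ⟨k, hk, heq⟩ := List.mem_iff_getElem.mp h
    have hlen : k < min (e + 1 - s) (l.length - s) := by simpa using hk
    refine ⟨s + k, by omega, by omega, by omega, ?_⟩
    rw [List.getElem_take, List.getElem_drop] at heq
    exact heq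
  · rintro ⟨k, hsk, hke, hk, heq⟩
    apply List.mem_iff_getElem.mpr
    refine ⟨k - s, by simp; omega, ?_⟩
    rw [List.getElem_take, List.getElem_drop]
    have : s + (k - s) = k := by omega
    simp_rw [this]
    exact heq

lemma pairval_mono (l : List Int) (x lo hi w : Int) :
    PairVal l lo hi w → PairVal (l ++ [x]) lo hi w := by
  rintro ⟨i, j, hi', hj, h1, h2, h3⟩
  exact ⟨i, j, by simp; omega, by simp; omega,
    by rw [List.getElem_append_left hi']; exact h1,
    by rw [List.getElem_append_left hj]; exact h2, h3⟩

lemma pairval_append_elim (l : List Int) (x lo hi w : Int) :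
    PairVal (l ++ [x]) lo hi w →
      PairVal l lo hi w ∨
      (∃ (j : ℕ) (_ : j < l.length), l[j] = hi ∧ x = lo ∧ w = (l.length : Int) - (j : Int) + 1) ∨
      (∃ (i : ℕ) (_ : i < l.length), l[i] = lo ∧ x = hi ∧ w = (l.length : Int) - (i : Int) + 1) ∨
      (x = lo ∧ x = hi ∧ w = 1) := by
  rintro ⟨i, j, hi', hj, h1, h2, h3⟩
  have hi2 : i < l.length + 1 := by simpa using hi'
  have hj2 : j < l.length + 1 := by simpa using hj
  by_cases ci : i < l.length <;> by_cases cj : j < l.length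
  · left
    exact ⟨i, j, ci, cj, by rw [List.getElem_append_left ci] at h1; exact h1,
      by rw [List.getElem_append_left cj] at h2; exact h2, h3⟩
  · -- j = l.length : x = hi
    have hjl : j = l.length := by omega
    have hx : x = hi := by
      rw [List.getElem_concat_length hjl] at h2; exact h2
    by_cases cii : i < l.length
    · right; right; left
      refine ⟨i, cii, by rw [List.getElem_append_left cii] at h1; exact h1, hx, ?_⟩
      have hmax : max i j = l.length := by omega
      have hmin : min i j = i := by omega
      rw [hmax, hmin] at h3; exact h3
    · have hil : i = l.length := by omega
      have hx2 : x = lo := by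
        rw [List.getElem_concat_length hil] at h1; exact h1
      right; right; right
      refine ⟨hx2, hx, ?_⟩
      have : max i j = min i j := by omega
      rw [this] at h3; omega
  · -- i = l.length, j < l.length : x = lo
    have hil : i = l.length := by omega
    have hx : x = lo := by
      rw [List.getElem_concat_length hil] at h1; exact h1
    right; left
    refine ⟨j, cj, by rw [List.getElem_append_left cj] at h2; exact h2, hx, ?_⟩
    have hmax : max i j = l.length := by omega
    have hmin : min i j = j := by omega
    rw [hmax, hmin] at h3; exact h3
  · have hil : i = l.length := by omega
    have hjl : j = l.length := by omega
    have hx1 : x = lo := by rw [List.getElem_concat_length hil] at h1; exact h1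
    have hx2 : x = hi := by rw [List.getElem_concat_length hjl] at h2; exact h2
    right; right; right
    refine ⟨hx1, hx2, ?_⟩
    have : max i j = min i j := by omega
    rw [this] at h3; omega

lemma pairval_new_lo (l : List Int) (x lo hi : Int) (j : ℕ) (hj : j < l.length)
    (hx : x = lo) (hv : l[j] = hi) :
    PairVal (l ++ [x]) lo hi ((l.length : Int) - (j : Int) + 1) := by
  refine ⟨l.length, j, by simp, by simp; omega,
    by rw [List.getElem_concat_length rfl]; exact hx,
    by rw [List.getElem_append_left hj]; exact hv, ?_⟩
  have hmax : max l.length j = l.length := by omega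
  have hmin : min l.length j = j := by omega
  rw [hmax, hmin]

lemma pairval_new_hi (l : List Int) (x lo hi : Int) (i : ℕ) (hi' : i < l.length)
    (hx : x = hi) (hv : l[i] = lo) :
    PairVal (l ++ [x]) lo hi ((l.length : Int) - (i : Int) + 1) := by
  refine ⟨i, l.length, by simp; omega, by simp,
    by rw [List.getElem_append_left hi']; exact hv,
    by rw [List.getElem_concat_length rfl]; exact hx, ?_⟩
  have hmax : max i l.length = l.length := by omega
  have hmin : min i l.length = i := by omega
  rw [hmax, hmin]

lemma pairval_both (l : List Int) (x lo hi : Int) (h1 : x = lo) (h2 : x = hi) :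
    PairVal (l ++ [x]) lo hi 1 := by
  refine ⟨l.length, l.length, by simp, by simp,
    by rw [List.getElem_concat_length rfl]; exact h1,
    by rw [List.getElem_concat_length rfl]; exact h2, by simp⟩

lemma lastidx_append_eq (l : List Int) (x c : Int) (hx : x = c) :
    LastIdx (l ++ [x]) c (l.length : Int) := by
  right
  refine ⟨l.length, by simp, rfl, by rw [List.getElem_concat_length rfl]; exact hx, ?_⟩
  intro j hj _
  simp at hj; omega

lemma lastidx_append_ne (l : List Int) (x c v : Int) (hx : x ≠ c) (h : LastIdx l c v) :
    LastIdx (l ++ [x]) c v := by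
  rcases h with ⟨h1, h2⟩ | ⟨k, hk, h1, h2, h3⟩
  · left
    refine ⟨h1, ?_⟩
    simp
    exact ⟨h2, fun hc => hx hc.symm⟩
  · right
    refine ⟨k, by simp; omega, h1, by rw [List.getElem_append_left hk]; exact h2, ?_⟩
    intro j hj hjc
    have hj2 : j < l.length + 1 := by simpa using hj
    by_cases cj : j < l.length
    · rw [List.getElem_append_left cj] at hjc
      exact h3 j cj hjc
    · have : j = l.length := by omega
      rw [List.getElem_concat_length this] at hjc
      exact absurd hjc hx

lemma lastidx_nonneg_elim (l : List Int) (c v : Int) (h : LastIdx l c v) (hv : v ≥ 0) :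
    ∃ (k : ℕ) (_ : k < l.length), v = (k : Int) ∧ l[k] = c ∧
      ∀ (j : ℕ) (_ : j < l.length), l[j] = c → j ≤ k := by
  rcases h with ⟨h1, _⟩ | h
  · omega
  · exact h

-- the single step of B preserves the invariant
lemma not_mem_of_lastidx_neg (l : List Int) (c v : Int) (h : LastIdx l c v) (hv : ¬ v ≥ 0) : c ∉ l := by
  rcases h with ⟨_, h2⟩ | ⟨k, hk, h1, _, _⟩
  · exact h2
  · omega

lemma bstep_inv (lo hi n : Int) (l : List Int) (x b ll lh : Int)
    (h1 : LastIdx l lo ll) (h2 : LastIdx l hi lh) (h3 : b ≤ n)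
    (h4 : b = n ∨ PairVal l lo hi b) (h5 : ∀ w, PairVal l lo hi w → b ≤ w) :
    LastIdx (l ++ [x]) lo (bstep lo hi (b, ll, lh) ((l.length : Int), x)).2.1 ∧
    LastIdx (l ++ [x]) hi (bstep lo hi (b, ll, lh) ((l.length : Int), x)).2.2 ∧
    (bstep lo hi (b, ll, lh) ((l.length : Int), x)).1 ≤ n ∧
    ((bstep lo hi (b, ll, lh) ((l.length : Int), x)).1 = n ∨
      PairVal (l ++ [x]) lo hi (bstep lo hi (b, ll, lh) ((l.length : Int), x)).1) ∧
    (∀ w, PairVal (l ++ [x]) lo hi w → (bstep lo hi (b, ll, lh) ((l.length : Int), x)).1 ≤ w) := by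
  have hN : ((l.length : Int)) ≥ 0 := by positivity
  have hmono : ∀ w, PairVal l lo hi w → PairVal (l ++ [x]) lo hi w := fun w => pairval_mono l x lo hi w
  have h11 : ((l.length : Int)) - (l.length : Int) + 1 = 1 := by ring
  by_cases hxl : x = lo <;> by_cases hxh : x = hi
  · -- x = lo and x = hi
    by_cases hlh : lh ≥ 0
    · obtain ⟨k, hk, hkeq, hkval, hklast⟩ := lastidx_nonneg_elim l hi lh h2 hlh
      have hcand : PairVal (l ++ [x]) lo hi ((l.length : Int) - lh + 1) := by
        rw [hkeq]; exact pairval_new_lo l x lo hi k hk hxl hkval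
      simp only [bstep, if_pos hxl, if_pos hxh, if_pos hlh, if_pos hN, h11]
      refine ⟨lastidx_append_eq l x lo hxl, lastidx_append_eq l x hi hxh, by omega, ?_, ?_⟩
      · rcases min_cases (min b ((l.length : Int) - lh + 1)) 1 with ⟨hm, _⟩ | ⟨hm, _⟩
        · rw [hm]
          rcases min_cases b ((l.length : Int) - lh + 1) with ⟨hm2, _⟩ | ⟨hm2, _⟩
          · rw [hm2]; rcases h4 with h | h
            · exact Or.inl h
            · exact Or.inr (hmono _ h)
          · rw [hm2]; exact Or.inr hcand
        · rw [hm]; exact Or.inr (pairval_both l x lo hi hxl hxh)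
      · intro w hw
        rcases pairval_append_elim l x lo hi w hw with h | ⟨j, hj, hval, _, hweq⟩ | ⟨i, hi', hval, _, hweq⟩ | ⟨_, _, hweq⟩
        · have := h5 w h; omega
        · have hjk : (j : Int) ≤ (k : Int) := by exact_mod_cast hklast j hj hval
          omega
        · have : (i : Int) < (l.length : Int) := by exact_mod_cast hi'
          omega
        · omega
    · have hhnm : hi ∉ l := not_mem_of_lastidx_neg l hi lh h2 hlh
      simp only [bstep, if_pos hxl, if_pos hxh, if_neg hlh, if_pos hN, h11]
      refine ⟨lastidx_append_eq l x lo hxl, lastidx_append_eq l x hi hxh, by omega, ?_, ?_⟩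
      · rcases min_cases b 1 with ⟨hm, _⟩ | ⟨hm, _⟩
        · rw [hm]; rcases h4 with h | h
          · exact Or.inl h
          · exact Or.inr (hmono _ h)
        · rw [hm]; exact Or.inr (pairval_both l x lo hi hxl hxh)
      · intro w hw
        rcases pairval_append_elim l x lo hi w hw with h | ⟨j, hj, hval, _, hweq⟩ | ⟨i, hi', hval, _, hweq⟩ | ⟨_, _, hweq⟩
        · have := h5 w h; omega
        · exact absurd (hval ▸ List.getElem_mem hj) hhnm
        · have : (i : Int) < (l.length : Int) := by exact_mod_cast hi'
          omega
        · omega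
  · -- x = lo, x ≠ hi
    by_cases hlh : lh ≥ 0
    · obtain ⟨k, hk, hkeq, hkval, hklast⟩ := lastidx_nonneg_elim l hi lh h2 hlh
      have hcand : PairVal (l ++ [x]) lo hi ((l.length : Int) - lh + 1) := by
        rw [hkeq]; exact pairval_new_lo l x lo hi k hk hxl hkval
      simp only [bstep, if_pos hxl, if_neg hxh, if_pos hlh]
      refine ⟨lastidx_append_eq l x lo hxl, lastidx_append_ne l x hi lh hxh h2, by omega, ?_, ?_⟩
      · rcases min_cases b ((l.length : Int) - lh + 1) with ⟨hm, _⟩ | ⟨hm, _⟩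
        · rw [hm]; rcases h4 with h | h
          · exact Or.inl h
          · exact Or.inr (hmono _ h)
        · rw [hm]; exact Or.inr hcand
      · intro w hw
        rcases pairval_append_elim l x lo hi w hw with h | ⟨j, hj, hval, _, hweq⟩ | ⟨i, hi', hval, hxx, hweq⟩ | ⟨_, hxx, hweq⟩
        · have := h5 w h; omega
        · have hjk : (j : Int) ≤ (k : Int) := by exact_mod_cast hklast j hj hval
          omega
        · exact absurd hxx hxh
        · exact absurd hxx hxh
    · have hhnm : hi ∉ l := not_mem_of_lastidx_neg l hi lh h2 hlh
      simp only [bstep, if_pos hxl, if_neg hxh, if_neg hlh]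
      refine ⟨lastidx_append_eq l x lo hxl, lastidx_append_ne l x hi lh hxh h2, by omega, ?_, ?_⟩
      · rcases h4 with h | h
        · exact Or.inl h
        · exact Or.inr (hmono _ h)
      · intro w hw
        rcases pairval_append_elim l x lo hi w hw with h | ⟨j, hj, hval, _, hweq⟩ | ⟨i, hi', hval, hxx, hweq⟩ | ⟨_, hxx, hweq⟩
        · exact h5 w h
        · exact absurd (hval ▸ List.getElem_mem hj) hhnm
        · exact absurd hxx hxh
        · exact absurd hxx hxh
  · -- x ≠ lo, x = hi
    by_cases hll : ll ≥ 0
    · obtain ⟨k, hk, hkeq, hkval, hklast⟩ := lastidx_nonneg_elim l lo ll h1 hll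
      have hcand : PairVal (l ++ [x]) lo hi ((l.length : Int) - ll + 1) := by
        rw [hkeq]; exact pairval_new_hi l x lo hi k hk hxh hkval
      simp only [bstep, if_neg hxl, if_pos hxh, if_pos hll]
      refine ⟨lastidx_append_ne l x lo ll hxl h1, lastidx_append_eq l x hi hxh, by omega, ?_, ?_⟩
      · rcases min_cases b ((l.length : Int) - ll + 1) with ⟨hm, _⟩ | ⟨hm, _⟩
        · rw [hm]; rcases h4 with h | h
          · exact Or.inl h
          · exact Or.inr (hmono _ h)
        · rw [hm]; exact Or.inr hcand
      · intro w hw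
        rcases pairval_append_elim l x lo hi w hw with h | ⟨j, hj, hval, hxx, hweq⟩ | ⟨i, hi', hval, _, hweq⟩ | ⟨hxx, _, hweq⟩
        · have := h5 w h; omega
        · exact absurd hxx hxl
        · have hik : (i : Int) ≤ (k : Int) := by exact_mod_cast hklast i hi' hval
          omega
        · exact absurd hxx hxl
    · have hlnm : lo ∉ l := not_mem_of_lastidx_neg l lo ll h1 hll
      simp only [bstep, if_neg hxl, if_pos hxh, if_neg hll]
      refine ⟨lastidx_append_ne l x lo ll hxl h1, lastidx_append_eq l x hi hxh, by omega, ?_, ?_⟩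
      · rcases h4 with h | h
        · exact Or.inl h
        · exact Or.inr (hmono _ h)
      · intro w hw
        rcases pairval_append_elim l x lo hi w hw with h | ⟨j, hj, hval, hxx, hweq⟩ | ⟨i, hi', hval, _, hweq⟩ | ⟨hxx, _, hweq⟩
        · exact h5 w h
        · exact absurd hxx hxl
        · exact absurd (hval ▸ List.getElem_mem hi') hlnm
        · exact absurd hxx hxl
  · -- neither
    simp only [bstep, if_neg hxl, if_neg hxh]
    refine ⟨lastidx_append_ne l x lo ll hxl h1, lastidx_append_ne l x hi lh hxh h2, h3, ?_, ?_⟩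
    · rcases h4 with h | h
      · exact Or.inl h
      · exact Or.inr (hmono _ h)
    · intro w hw
      rcases pairval_append_elim l x lo hi w hw with h | ⟨j, hj, hval, hxx, hweq⟩ | ⟨i, hi', hval, hxx, hweq⟩ | ⟨hxx, _, hweq⟩
      · exact h5 w h
      · exact absurd hxx hxl
      · exact absurd hxx hxh
      · exact absurd hxx hxl

-- B's loop invariant, over the whole list
lemma bfold_inv (lo hi n : Int) (l : List Int) :
    LastIdx l lo ((PySem.List.enumerate l 0).foldl (bstep lo hi) (n, -1, -1)).2.1 ∧
    LastIdx l hi ((PySem.List.enumerate l 0).foldl (bstep lo hi) (n, -1, -1)).2.2 ∧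
    ((PySem.List.enumerate l 0).foldl (bstep lo hi) (n, -1, -1)).1 ≤ n ∧
    (((PySem.List.enumerate l 0).foldl (bstep lo hi) (n, -1, -1)).1 = n ∨
      PairVal l lo hi ((PySem.List.enumerate l 0).foldl (bstep lo hi) (n, -1, -1)).1) ∧
    (∀ w, PairVal l lo hi w → ((PySem.List.enumerate l 0).foldl (bstep lo hi) (n, -1, -1)).1 ≤ w) := by
  induction l using List.reverseRecOn with
  | nil =>
    refine ⟨Or.inl ⟨rfl, by simp⟩, Or.inl ⟨rfl, by simp⟩, ?_, ?_, ?_⟩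
    · simp [PySem.List.enumerate_nil]
    · simp [PySem.List.enumerate_nil]
    · rintro w ⟨i, j, hi', _, _⟩
      simp at hi'
  | append_singleton l x ih =>
    obtain ⟨ih1, ih2, ih3, ih4, ih5⟩ := ih
    rw [PySem.List.enumerate_append, List.foldl_append]
    have hsing : PySem.List.enumerate [x] ((0 : Int) + l.length) = [(((l.length : Int)), x)] := by
      simp [PySem.List.enumerate_cons, PySem.List.enumerate_nil]
    rw [hsing]
    simp only [List.foldl_cons, List.foldl_nil]
    have hst : ((PySem.List.enumerate l 0).foldl (bstep lo hi) (n, -1, -1)) =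
        (((PySem.List.enumerate l 0).foldl (bstep lo hi) (n, -1, -1)).1,
         ((PySem.List.enumerate l 0).foldl (bstep lo hi) (n, -1, -1)).2.1,
         ((PySem.List.enumerate l 0).foldl (bstep lo hi) (n, -1, -1)).2.2) := by
      simp
    rw [hst]
    exact bstep_inv lo hi n l x _ _ _ ih1 ih2 ih3 ih4 ih5

-- ---- bridging the two candidate sets ----

lemma span_of_pair (A : List Int) (lo hi v : Int) (h : PairVal A lo hi v) : SpanVal A lo hi v := by
  obtain ⟨i, j, hi', hj, h1, h2, h3⟩ := h
  refine ⟨min i j, max i j, by omega, by omega, ?_, ?_, by omega⟩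
  · exact (mem_span_iff A _ _ lo (by omega)).mpr ⟨i, by omega, by omega, hi', h1⟩
  · exact (mem_span_iff A _ _ hi (by omega)).mpr ⟨j, by omega, by omega, hj, h2⟩

lemma pair_le_of_span (A : List Int) (lo hi v : Int) (h : SpanVal A lo hi v) :
    ∃ w, PairVal A lo hi w ∧ w ≤ v := by
  obtain ⟨s, e, hse, he, hlo, hhi, hv⟩ := h
  obtain ⟨i, hsi, hie, hi', h1⟩ := (mem_span_iff A s e lo he).mp hlo
  obtain ⟨j, hsj, hje, hj, h2⟩ := (mem_span_iff A s e hi he).mp hhi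
  exact ⟨_, ⟨i, j, hi', hj, h1, h2, rfl⟩, by omega⟩

lemma span_whole (A : List Int) (lo hi : Int) (hne : A ≠ []) (hlo : lo ∈ A) (hhi : hi ∈ A) :
    SpanVal A lo hi (A.length : Int) := by
  have hpos : 0 < A.length := List.length_pos_iff.mpr hne
  obtain ⟨i, hi', h1⟩ := List.mem_iff_getElem.mp hlo
  obtain ⟨j, hj, h2⟩ := List.mem_iff_getElem.mp hhi
  refine ⟨0, A.length - 1, by omega, by omega, ?_, ?_, by omega⟩
  · exact (mem_span_iff A _ _ lo (by omega)).mpr ⟨i, by omega, by omega, hi', h1⟩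
  · exact (mem_span_iff A _ _ hi (by omega)).mpr ⟨j, by omega, by omega, hj, h2⟩

-- ---- A-side machinery ----

lemma foldl_foldl {α β γ : Type} (l : List α) (f : α → List β) (g : γ → β → γ) :
    ∀ init, l.foldl (fun acc x => (f x).foldl g acc) init = (l.flatMap f).foldl g init := by
  induction l with
  | nil => intro init; simp
  | cons a t ih => intro init; simp [List.foldl_append, ih]

lemma fold_if_pmin {β : Type} (l : List β) (P : β → Prop) [DecidablePred P] (g : β → Int) :
    ∀ acc, l.foldl (fun acc x => if P x then pmin acc (g x) else acc) acc =
      ((l.filter (fun x => decide (P x))).map g).foldl pmin acc := by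
  induction l with
  | nil => intro acc; simp
  | cons a t ih =>
    intro acc
    by_cases h : P a <;> simp [h, ih]

lemma foldl_pmin_some (t : List Int) : ∀ m : Int, t.foldl pmin (some m) = some (t.foldl min m) := by
  induction t with
  | nil => intro m; simp
  | cons a t ih => intro m; simp [pmin, ih]

lemma foldl_pmin_none_spec (vs : List Int) (hne : vs ≠ []) :
    ∃ m, vs.foldl pmin none = some m ∧ m ∈ vs ∧ ∀ v ∈ vs, m ≤ v := by
  cases vs with
  | nil => exact absurd rfl hne
  | cons v t =>
    refine ⟨t.foldl min v, ?_, ?_, ?_⟩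
    · simp [pmin, foldl_pmin_some]
    · rcases PySem.List.foldl_min_mem t v with h | h
      · simp [h]
      · exact List.mem_cons_of_mem _ h
    · intro w hw
      rcases List.mem_cons.mp hw with h | h
      · exact h ▸ (PySem.List.foldl_min_le t v).1
      · exact (PySem.List.foldl_min_le t v).2 w h

-- solve's double loop computes the minimum over all qualifying windows
def apairs (n : Int) : List (Int × Int) :=
  (PySem.List.pyRange 0 n 1).flatMap (fun s => (PySem.List.pyRange s n 1).map (fun e => (s, e)))

lemma mem_acands_iff (A : List Int) (lo hi v : Int) :
    v ∈ ((apairs (A.length : Int)).filter (fun p => decide (lo ∈ PySem.List.slice A (some p.1) (some (p.2 + 1)) ∧ hi ∈ PySem.List.slice A (some p.1) (some (p.2 + 1))))).map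
        (fun p => p.2 - p.1 + 1) ↔ SpanVal A lo hi v := by
  constructor
  · intro h
    obtain ⟨p, hpf, hv⟩ := List.mem_map.mp h
    obtain ⟨hp, hcond⟩ := List.mem_filter.mp hpf
    have hcond' : lo ∈ PySem.List.slice A (some p.1) (some (p.2 + 1)) ∧ hi ∈ PySem.List.slice A (some p.1) (some (p.2 + 1)) := of_decide_eq_true hcond
    obtain ⟨s, hs, hp2⟩ := List.mem_flatMap.mp hp
    obtain ⟨e, he, hpe⟩ := List.mem_map.mp hp2
    obtain ⟨hs0, hsn⟩ := (PySem.List.mem_pyRange_one).mp hs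
    obtain ⟨hse, hen⟩ := (PySem.List.mem_pyRange_one).mp he
    subst hpe
    obtain ⟨hlo, hhi⟩ := hcond'
    simp only at hlo hhi
    rw [PySem.List.slice_toNat A (by omega) (by omega)] at hlo hhi
    have ht : (e + 1).toNat = e.toNat + 1 := by omega
    rw [ht] at hlo hhi
    refine ⟨s.toNat, e.toNat, by omega, by omega, hlo, hhi, by simp at hv ⊢; omega⟩
  · rintro ⟨s, e, hse, he, hlo, hhi, hv⟩
    apply List.mem_map.mpr
    refine ⟨((s : Int), (e : Int)), List.mem_filter.mpr ⟨?_, ?_⟩, by simp; omega⟩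
    · apply List.mem_flatMap.mpr
      refine ⟨(s : Int), (PySem.List.mem_pyRange_one).mpr ⟨by positivity, by omega⟩, ?_⟩
      exact List.mem_map.mpr ⟨(e : Int), (PySem.List.mem_pyRange_one).mpr ⟨by omega, by omega⟩, rfl⟩
    · apply decide_eq_true
      have hb : ((e : Int) + 1) = (((e + 1 : ℕ) : Int)) := by push_cast; ring
      constructor <;>
        · show _ ∈ PySem.List.slice A (some (s : Int)) (some ((e : Int) + 1))
          rw [hb, PySem.List.slice_natCast A]
          simpa using ‹_ ∈ (A.drop s).take (e + 1 - s)›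

lemma solve_char (A : List Int) (hne : A ≠ []) :
    SpanVal A ((PySem.List.min? A (fun x => x)).getD 0) ((PySem.List.max? A (fun x => x)).getD 0) (solve A) ∧
    ∀ v, SpanVal A ((PySem.List.min? A (fun x => x)).getD 0) ((PySem.List.max? A (fun x => x)).getD 0) v →
      solve A ≤ v := by
  have hlen : (A.length : Int) ≠ 0 := by
    simpa using fun h => hne (List.length_eq_zero_iff.mp h)
  set lo := ((PySem.List.min? A (fun x => x)).getD 0) with hlo_def
  set hi := ((PySem.List.max? A (fun x => x)).getD 0) with hhi_def
  have hlo_mem : lo ∈ A := by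
    cases h : PySem.List.min? A (fun x => x) with
    | none => exact absurd ((PySem.List.min?_eq_none_iff A _).mp h) hne
    | some m => rw [hlo_def, h]; simpa using PySem.List.min?_mem h
  have hhi_mem : hi ∈ A := by
    cases h : PySem.List.max? A (fun x => x) with
    | none => exact absurd ((PySem.List.max?_eq_none_iff A _).mp h) hne
    | some m => rw [hhi_def, h]; simpa using PySem.List.max?_mem h
  have hsolve : solve A = ((PySem.List.pyRange 0 (A.length : Int) 1).foldl (fun acc start =>
      (PySem.List.pyRange start (A.length : Int) 1).foldl (ainner A lo hi start) acc) none).getD 0 := by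
    simp only [solve]
    rw [if_neg hlen]
  have hflat : (PySem.List.pyRange 0 (A.length : Int) 1).foldl (fun acc start =>
      (PySem.List.pyRange start (A.length : Int) 1).foldl (ainner A lo hi start) acc) none =
      (apairs (A.length : Int)).foldl
        (fun acc p => if (lo ∈ PySem.List.slice A (some p.1) (some (p.2 + 1)) ∧ hi ∈ PySem.List.slice A (some p.1) (some (p.2 + 1))) then pmin acc (p.2 - p.1 + 1) else acc) none := by
    rw [apairs, ← foldl_foldl]
    congr 1
    funext acc s
    rw [List.foldl_map]
    rfl
  have hcands := fold_if_pmin (apairs (A.length : Int)) (fun p => lo ∈ PySem.List.slice A (some p.1) (some (p.2 + 1)) ∧ hi ∈ PySem.List.slice A (some p.1) (some (p.2 + 1))) (fun p => p.2 - p.1 + 1) none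
  set cands := ((apairs (A.length : Int)).filter (fun p => decide (lo ∈ PySem.List.slice A (some p.1) (some (p.2 + 1)) ∧ hi ∈ PySem.List.slice A (some p.1) (some (p.2 + 1))))).map
      (fun p => p.2 - p.1 + 1) with hc_def
  have hcne : cands ≠ [] := by
    intro hnil
    have := (mem_acands_iff A lo hi (A.length : Int)).mpr (span_whole A lo hi hne hlo_mem hhi_mem)
    rw [← hc_def] at this
    simp [hnil] at this
  obtain ⟨m, hm_eq, hm_mem, hm_le⟩ := foldl_pmin_none_spec cands hcne
  have hsolve2 : solve A = m := by
    rw [hsolve, hflat, hcands, hm_eq]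
    rfl
  constructor
  · rw [hsolve2]
    exact (mem_acands_iff A lo hi m).mp (hc_def ▸ hm_mem)
  · intro v hv
    rw [hsolve2]
    exact hm_le v (hc_def ▸ (mem_acands_iff A lo hi v).mpr hv)


-- ===== VERDICT (by name: the statement is the Claim_ definition above) =====
theorem solve_spec : Claim_equal_solve := by
  intro A _
  unfold Spec_solve
  by_cases hA : A = []
  · subst hA; rfl
  · have hlen : (A.length : Int) ≠ 0 := by
      simpa using fun h => hA (List.length_eq_zero_iff.mp h)
    set lo := ((PySem.List.min? A (fun x => x)).getD 0) with hlo_def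
    set hi := ((PySem.List.max? A (fun x => x)).getD 0) with hhi_def
    have hlo_mem : lo ∈ A := by
      cases h : PySem.List.min? A (fun x => x) with
      | none => exact absurd ((PySem.List.min?_eq_none_iff A _).mp h) hA
      | some m =>
        rw [hlo_def, h]
        simpa using PySem.List.min?_mem h
    have hhi_mem : hi ∈ A := by
      cases h : PySem.List.max? A (fun x => x) with
      | none => exact absurd ((PySem.List.max?_eq_none_iff A _).mp h) hA
      | some m =>
        rw [hhi_def, h]
        simpa using PySem.List.max?_mem h
    obtain ⟨hspan1, hmin1⟩ := solve_char A hA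
    have hB := bfold_inv lo hi (A.length : Int) A
    have hB_eq : solve_alt A = ((PySem.List.enumerate A 0).foldl (bstep lo hi) ((A.length : Int), -1, -1)).1 := by
      simp only [solve_alt]
      rw [if_neg hlen]
    obtain ⟨-, -, hle_n, hmem2, hmin2⟩ := hB
    rw [hB_eq]
    set v2 := ((PySem.List.enumerate A 0).foldl (bstep lo hi) ((A.length : Int), -1, -1)).1
    -- v2 ≤ solve A
    obtain ⟨w, hw_pair, hw_le⟩ := pair_le_of_span A lo hi (solve A) hspan1
    have h21 : v2 ≤ solve A := le_trans (hmin2 w hw_pair) hw_le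
    -- solve A ≤ v2
    have h12 : solve A ≤ v2 := by
      rcases hmem2 with h | h
      · rw [h]; exact hmin1 _ (span_whole A lo hi hA hlo_mem hhi_mem)
      · exact hmin1 _ (span_of_pair A lo hi v2 h)
    exact le_antisymm h12 h21
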